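-- pv_equiv track=rewrite | github.com/KIM-KYOUNG-OH/Algorithm-by-python | 프로그래머스/완전탐색/모의고사.py | solution
-- ===== SOURCE A (Python) =====
-- def solution(answers):
--     person1 = [1, 2, 3, 4, 5]
--     person2 = [2, 1, 2, 3, 2, 4, 2, 5]
--     person3 = [3, 3, 1, 1, 2, 2, 4, 4, 5, 5]
--     cnts = [0, 0, 0]  # 1, 2, 3번 수포자의 정답 횟수
--     for i in range(len(answers)):
--         if answers[i] == person1[i % 5]:
--             cnts[0] += 1
--         if answers[i] == person2[i % 8]:
--             cnts[1] += 1
--         if answers[i] == person3[i % 10]: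
--             cnts[2] += 1
--
--     answer = []
--     for i, cnt in enumerate(cnts):
--         if cnt == max(cnts):
--             answer.append(i + 1)
--
--     return answer
-- ===== SOURCE B (Python) =====
-- def solution(answers):
--     # Residue-class frequency index: one pass builds occ[(i % 40, a)] counts
--     # (40 = lcm of the pattern lengths), then each pattern's score is a fixed
--     # 40-term table-lookup sum -- no per-answer pattern comparisons.
--     occ = {}
--     for i, a in enumerate(answers):
--         k = (i % 40, a)
--         occ[k] = occ.get(k, 0) + 1
--     patterns = [[1, 2, 3, 4, 5],
--                 [2, 1, 2, 3, 2, 4, 2, 5],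
--                 [3, 3, 1, 1, 2, 2, 4, 4, 5, 5]]
--     cnts = [sum(occ.get((r, g[r % len(g)]), 0) for r in range(40)) for g in patterns]
--     best = max(cnts)
--     return [i + 1 for i, c in enumerate(cnts) if c == best]
-- ===== Notes on version B (the rewrite author's own statement) =====
-- stated objective: alternative
-- what changed: Replaces A's fused per-answer loop that compares each answer against three modularly-indexed patterns by a residue-class frequency index: one pass builds a dict keyed by (i % 40, answer), after which each pattern's score is a fixed 40-term lookup sum with no per-answer pattern comparison.
import Mathlib
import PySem

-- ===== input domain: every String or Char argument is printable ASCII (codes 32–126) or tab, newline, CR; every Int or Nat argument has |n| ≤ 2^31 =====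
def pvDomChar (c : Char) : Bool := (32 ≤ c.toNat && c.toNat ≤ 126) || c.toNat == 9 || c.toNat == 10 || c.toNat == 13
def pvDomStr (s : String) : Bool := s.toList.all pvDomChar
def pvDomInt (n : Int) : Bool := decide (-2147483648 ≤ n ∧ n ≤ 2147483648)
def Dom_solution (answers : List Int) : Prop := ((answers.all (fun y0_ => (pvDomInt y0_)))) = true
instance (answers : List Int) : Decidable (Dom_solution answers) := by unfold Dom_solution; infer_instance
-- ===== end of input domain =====

-- B replaces A's fused per-answer comparisons against three modularly-indexed patterns by a
-- residue-class frequency index (a dict keyed by (i % 40, answer)); each score is then a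
-- fixed 40-term lookup sum (alternative algorithm, same cost).

-- ===== PORT A =====
def solution (answers : List Int) : List Int :=
  let person1 : List Int := [1, 2, 3, 4, 5]
  let person2 : List Int := [2, 1, 2, 3, 2, 4, 2, 5]
  let person3 : List Int := [3, 3, 1, 1, 2, 2, 4, 4, 5, 5]
  -- for i in range(len(answers)): three independent 'if' updates of cnts
  -- (answers[i] is always in range here, so pyGetD with default 0 is exact)
  let cnts :=
    (PySem.List.pyRange 0 answers.length 1).foldl
      (fun (c : Int × Int × Int) i =>
        let c0 := if PySem.List.pyGetD answers i 0 = PySem.List.pyGetD person1 (PySem.Int.mod i 5) 0 then c.1 + 1 else c.1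
        let c1 := if PySem.List.pyGetD answers i 0 = PySem.List.pyGetD person2 (PySem.Int.mod i 8) 0 then c.2.1 + 1 else c.2.1
        let c2 := if PySem.List.pyGetD answers i 0 = PySem.List.pyGetD person3 (PySem.Int.mod i 10) 0 then c.2.2 + 1 else c.2.2
        (c0, c1, c2)) (0, 0, 0)
  let cntsL : List Int := [cnts.1, cnts.2.1, cnts.2.2]
  (PySem.List.enumerate cntsL 0).foldl
    (fun ans (p : Int × Int) =>
      if some p.2 = PySem.List.max? cntsL (fun y => y) then ans ++ [p.1 + 1] else ans) []

-- ===== PORT B =====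
-- occ = {}; for i, a in enumerate(answers): k = (i % 40, a); occ[k] = occ.get(k, 0) + 1
def pvOcc (answers : List Int) : PySem.Dict (Int × Int) Int :=
  (PySem.List.enumerate answers 0).foldl
    (fun d p =>
      let k : Int × Int := (PySem.Int.mod p.1 40, p.2)
      d.insert k (d.getD k 0 + 1))
    PySem.Dict.empty

def solution_alt (answers : List Int) : List Int :=
  let occ := pvOcc answers
  let patterns : List (List Int) := [[1, 2, 3, 4, 5], [2, 1, 2, 3, 2, 4, 2, 5], [3, 3, 1, 1, 2, 2, 4, 4, 5, 5]]
  -- cnts = [sum(occ.get((r, g[r % len(g)]), 0) for r in range(40)) for g in patterns]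
  let cnts : List Int := patterns.map (fun g =>
    ((PySem.List.pyRange 0 40 1).map
      (fun r => occ.getD (r, PySem.List.pyGetD g (PySem.Int.mod r (g.length : Int)) 0) 0)).sum)
  let best := (PySem.List.max? cnts (fun y => y)).getD 0
  (PySem.List.enumerate cnts 0).filterMap
    (fun (p : Int × Int) => if p.2 = best then some (p.1 + 1) else none)

-- ===== PRECONDITION & SPEC =====
def Spec_solution (answers : List Int) (out : List Int) : Prop := out = solution_alt answers
instance (answers : List Int) (out : List Int) : Decidable (Spec_solution answers out) := by unfold Spec_solution; infer_instance

-- ===== CLAIM (what is proved, stated in full; the proofs are below) =====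
def Claim_equal_solution : Prop := ∀ (answers : List Int), Dom_solution answers → Spec_solution answers (solution answers)

-- ===== LEMMAS AND PROOFS =====

-- a fold whose three components are updated independently splits into three folds
lemma pvSplit {α : Type} (l : List α) (f1 f2 f3 : Int → α → Int) :
    ∀ (a b c : Int),
      l.foldl (fun (s : Int × Int × Int) p => (f1 s.1 p, f2 s.2.1 p, f3 s.2.2 p)) (a, b, c)
        = (l.foldl f1 a, l.foldl f2 b, l.foldl f3 c) := by
  induction l with
  | nil => intro a b c; rfl
  | cons x t ih => intro a b c; simpa using ih (f1 a x) (f2 b x) (f3 c x)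

-- summing point counts of (r, v r) over distinct r covering all first components is a countP
lemma pvSumIndicator (x : Int × Int) (v : Int → Int) :
    ∀ (rs : List Int), rs.Nodup → x.1 ∈ rs →
      (rs.map (fun r => if x = (r, v r) then (1 : Int) else 0)).sum
        = if x.2 = v x.1 then (1 : Int) else 0 := by
  intro rs
  induction rs with
  | nil => intro _ h; cases h
  | cons r t ih =>
    intro hnd hmem
    rcases List.nodup_cons.mp hnd with ⟨hr, hts⟩
    by_cases hx : x.1 = r
    · have hnt : x.1 ∉ t := by rw [hx]; exact hr
      have hz : ∀ r' ∈ t, (if x = (r', v r') then (1 : Int) else 0) = 0 := by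
        intro r' hr'
        have : x ≠ (r', v r') := by
          intro he; exact hnt (by rw [he]; exact hr')
        simp [this]
      have hsum : (t.map (fun r' => if x = (r', v r') then (1 : Int) else 0)).sum = 0 := by
        rw [List.sum_eq_zero]; intro y hy
        rcases List.mem_map.mp hy with ⟨r', hr', he⟩
        rw [← he]; exact hz r' hr'
      have hpair : (x = (r, v r)) ↔ (x.2 = v x.1) := by
        subst hx
        constructor
        · intro h; rw [h]
        · intro h; exact Prod.ext rfl h
      simp only [List.map_cons, List.sum_cons, hsum, add_zero]
      by_cases h2 : x.2 = v x.1
      · simp [hpair.mpr h2]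
      · have : ¬ (x = (r, v r)) := fun h => h2 (hpair.mp h)
        simp [this, h2]
    · have hmem' : x.1 ∈ t := by
        rcases List.mem_cons.mp hmem with h | h
        · exact absurd h hx
        · exact h
      have : ¬ (x = (r, v r)) := by
        intro he; exact hx (by rw [he])
      simp only [List.map_cons, List.sum_cons, this, if_false, zero_add]
      exact ih hts hmem'

lemma pvSumCount (ks : List (Int × Int)) (rs : List Int) (v : Int → Int)
    (hnd : rs.Nodup) (hmem : ∀ k ∈ ks, k.1 ∈ rs) :
    (rs.map (fun r => ((ks.count (r, v r) : Int)))).sum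
      = (ks.countP (fun k => decide (k.2 = v k.1)) : Int) := by
  induction ks with
  | nil => simp
  | cons x t ih =>
    have hmt : ∀ k ∈ t, k.1 ∈ rs := fun k hk => hmem k (List.mem_cons_of_mem x hk)
    have hcnt : ∀ r : Int, ((List.count (r, v r) (x :: t) : Int))
        = (t.count (r, v r) : Int) + (if x = (r, v r) then (1 : Int) else 0) := by
      intro r
      rw [List.count_cons]
      by_cases h : x = (r, v r) <;> simp [h]
    have hmapeq : (rs.map (fun r => ((List.count (r, v r) (x :: t) : Int)))).sum
        = (rs.map (fun r => (t.count (r, v r) : Int))).sum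
          + (rs.map (fun r => if x = (r, v r) then (1 : Int) else 0)).sum := by
      rw [← List.sum_map_add]
      congr 1
      exact List.map_congr_left (fun r _ => hcnt r)
    rw [hmapeq, ih hmt, pvSumIndicator x v rs hnd (hmem x List.mem_cons_self), List.countP_cons]
    by_cases h2 : x.2 = v x.1 <;> simp [h2]

-- inner mod collapses when the pattern length divides 40
lemma pvModMod (a L : Int) (h0 : 0 < L) (hd : L ∣ 40) :
    PySem.Int.mod (PySem.Int.mod a 40) L = PySem.Int.mod a L := by
  rw [PySem.Int.mod_eq_emod_of_pos (by norm_num : (0:Int) < 40),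
      PySem.Int.mod_eq_emod_of_pos h0, PySem.Int.mod_eq_emod_of_pos h0,
      Int.emod_emod_of_dvd _ hd]

-- B's 40-term lookup sum for pattern g equals A's per-answer count for g
lemma pvCnt (answers g : List Int) (h0 : (0 : Int) < (g.length : Int)) (hd : ((g.length : Int)) ∣ 40) :
    ((PySem.List.pyRange 0 40 1).map
        (fun r => (pvOcc answers).getD (r, PySem.List.pyGetD g (PySem.Int.mod r (g.length : Int)) 0) 0)).sum
      = ((PySem.List.enumerate answers 0).countP
          (fun p => decide (p.2 = PySem.List.pyGetD g (PySem.Int.mod p.1 (g.length : Int)) 0)) : Int) := by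
  set ens := PySem.List.enumerate answers 0 with hens
  set key : Int × Int → Int × Int := fun p => (PySem.Int.mod p.1 40, p.2) with hkey
  set v : Int → Int := fun r => PySem.List.pyGetD g (PySem.Int.mod r (g.length : Int)) 0 with hv
  have hocc : pvOcc answers
      = (ens.map key).foldl (fun d x => d.insert x (d.getD x 0 + 1)) PySem.Dict.empty := by
    rw [List.foldl_map]; rfl
  have hget : ∀ w : Int × Int, (pvOcc answers).getD w 0 = ((ens.map key).count w : Int) := by
    intro w
    rw [hocc, PySem.Dict.getD_foldl_insert_add_one, PySem.Dict.getD_empty, zero_add]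
  have h1 : ((PySem.List.pyRange 0 40 1).map
      (fun r => (pvOcc answers).getD (r, v r) 0)).sum
      = ((PySem.List.pyRange 0 40 1).map (fun r => (((ens.map key).count (r, v r)) : Int))).sum := by
    congr 1
    exact List.map_congr_left (fun r _ => hget (r, v r))
  rw [h1, pvSumCount (ens.map key) (PySem.List.pyRange 0 40 1) v
        (PySem.List.nodup_pyRange_one 0 40)
        (by
          intro k hk
          rcases List.mem_map.mp hk with ⟨p, _, he⟩
          rw [← he]
          exact PySem.List.mem_pyRange_one.mpr
            ⟨PySem.Int.mod_nonneg p.1 (by norm_num), PySem.Int.mod_lt p.1 (by norm_num)⟩),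
      List.countP_map]
  congr 1
  apply List.countP_congr
  intro p _
  simp only [Function.comp, hkey, hv, pvModMod p.1 ((g.length : Int)) h0 hd]

-- winner selection: for any three counts, A's append loop equals B's filterMap
lemma pvSelect (c1 c2 c3 : Int) :
    (PySem.List.enumerate [c1, c2, c3] 0).foldl
      (fun ans (p : Int × Int) =>
        if some p.2 = PySem.List.max? [c1, c2, c3] (fun y => y) then ans ++ [p.1 + 1] else ans) []
    = (PySem.List.enumerate [c1, c2, c3] 0).filterMap
      (fun (p : Int × Int) =>
        if p.2 = (PySem.List.max? [c1, c2, c3] (fun y => y)).getD 0 then some (p.1 + 1) else none) := by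
  rw [show PySem.List.enumerate [c1, c2, c3] 0 = [(0, c1), (1, c2), (2, c3)] by
    simp [PySem.List.enumerate_cons, PySem.List.enumerate_nil]]
  rw [PySem.List.max?_id_cons]
  simp only [List.foldl_cons, List.foldl_nil, List.filterMap_cons, List.filterMap_nil,
    Option.some.injEq, Option.getD_some]
  split_ifs <;> rfl

-- ===== VERDICT (by name: the statement is the Claim_ definition above) =====
theorem solution_spec : Claim_equal_solution := by
  intro answers _
  unfold Spec_solution solution solution_alt
  -- turn A's index loop into a fold over enumerate, split it into three counts
  have hbr : (PySem.List.pyRange 0 (answers.length) 1).foldl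
      (fun (c : Int × Int × Int) i =>
        let c0 := if PySem.List.pyGetD answers i 0 = PySem.List.pyGetD [(1:Int),2,3,4,5] (PySem.Int.mod i 5) 0 then c.1 + 1 else c.1
        let c1 := if PySem.List.pyGetD answers i 0 = PySem.List.pyGetD [(2:Int),1,2,3,2,4,2,5] (PySem.Int.mod i 8) 0 then c.2.1 + 1 else c.2.1
        let c2 := if PySem.List.pyGetD answers i 0 = PySem.List.pyGetD [(3:Int),3,1,1,2,2,4,4,5,5] (PySem.Int.mod i 10) 0 then c.2.2 + 1 else c.2.2
        (c0, c1, c2)) (0, 0, 0)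
      = ((PySem.List.enumerate answers 0).foldl (fun a p => if p.2 = PySem.List.pyGetD [(1:Int),2,3,4,5] (PySem.Int.mod p.1 5) 0 then a + 1 else a) 0,
         (PySem.List.enumerate answers 0).foldl (fun a p => if p.2 = PySem.List.pyGetD [(2:Int),1,2,3,2,4,2,5] (PySem.Int.mod p.1 8) 0 then a + 1 else a) 0,
         (PySem.List.enumerate answers 0).foldl (fun a p => if p.2 = PySem.List.pyGetD [(3:Int),3,1,1,2,2,4,4,5,5] (PySem.Int.mod p.1 10) 0 then a + 1 else a) 0) := by
    rw [PySem.List.enumerate_eq_map_pyRange (d := 0)]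
    simp only [List.foldl_map, PySem.List.len_eq]
    exact pvSplit (PySem.List.pyRange 0 (answers.length : Int) 1)
      (fun a i => if PySem.List.pyGetD answers i 0 = PySem.List.pyGetD [(1:Int),2,3,4,5] (PySem.Int.mod i 5) 0 then a + 1 else a)
      (fun a i => if PySem.List.pyGetD answers i 0 = PySem.List.pyGetD [(2:Int),1,2,3,2,4,2,5] (PySem.Int.mod i 8) 0 then a + 1 else a)
      (fun a i => if PySem.List.pyGetD answers i 0 = PySem.List.pyGetD [(3:Int),3,1,1,2,2,4,4,5,5] (PySem.Int.mod i 10) 0 then a + 1 else a)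
      0 0 0
  have hc1 := pvCnt answers [1,2,3,4,5] (by norm_num) (by norm_num)
  have hc2 := pvCnt answers [2,1,2,3,2,4,2,5] (by norm_num) (by norm_num)
  have hc3 := pvCnt answers [3,3,1,1,2,2,4,4,5,5] (by norm_num) (by norm_num)
  norm_num at hc1 hc2 hc3
  have m5 : ∀ a : Int, PySem.Int.mod a 5 = a % 5 := fun a => PySem.Int.mod_eq_emod_of_pos (by norm_num)
  have m8 : ∀ a : Int, PySem.Int.mod a 8 = a % 8 := fun a => PySem.Int.mod_eq_emod_of_pos (by norm_num)
  have m10 : ∀ a : Int, PySem.Int.mod a 10 = a % 10 := fun a => PySem.Int.mod_eq_emod_of_pos (by norm_num)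
  have l5 : (([1,2,3,4,5] : List Int).length : Int) = 5 := by norm_num
  have l8 : (([2,1,2,3,2,4,2,5] : List Int).length : Int) = 8 := by norm_num
  have l10 : (([3,3,1,1,2,2,4,4,5,5] : List Int).length : Int) = 10 := by norm_num
  simp only [hbr]
  simp only [PySem.List.foldl_ite_add_one, zero_add, List.map_cons, List.map_nil,
    l5, l8, l10, m5, m8, m10, hc1, hc2, hc3]
  exact pvSelect _ _ _
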